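-- pv_equiv track=rewrite | github.com/sepear/snake_paths | snake_paths.py | numberOfAvailableDifferentPaths
-- ===== SOURCE A (Python) =====
-- def move(board,snake,action):
--     '''
--     If an action is valid, it performs it, if not, it returns invalid.
--
--     We only have to check that the new position of the head is valid,
--     since the rest of the cells become positions that were previously valid
--
--     '''
--     if action=='L':
--         new_head=[snake[0][0]-1,snake[0][1]]
--         if snake[0][0]==0 or new_head in snake[:-1]:
--             return "invalid"
--
--     elif action=='R':
--         new_head=[snake[0][0]+1,snake[0][1]]
--         if snake[0][0]==board[0]-1 or new_head in snake[:-1]: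
--             return "invalid"
--
--     elif action== 'U':
--         new_head=[snake[0][0], snake[0][1]-1]
--         if snake[0][1]==0 or new_head in snake[:-1]:
--             return "invalid"
--
--     else:#action == D
--         new_head=[snake[0][0], snake[0][1]+1]
--         if snake[0][1]==board[1]-1 or new_head in snake[:-1]:
--             return "invalid"
--
--
--     #valid
--     new_snake=[new_head]
--     for i in range(len(snake)-1):
--         new_snake.append(snake[i])
--     return new_snake
--
-- def numberOfAvailableDifferentPaths(board,snake,depth):
--     '''
--     BFS is used until we reach the given depth.
--
--     We are saving the states of the current depth to obtain those of the next depth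
--
--     '''
--     actions=['L','R','U','D']
--     current_depth=0
--     states=[snake]
--     new_states=[]
--     while current_depth<depth:
--         if len(states)==0:
--             break
--         for state in states:
--             for action in actions:
--                 movement= move(board,state,action)
--                 if movement !='invalid':
--                     new_states.append(movement)
--         states=new_states
--         new_states=[]
--         current_depth+=1
--     return len(states)%(1_000_000_007)
-- ===== SOURCE B (Python) =====
-- def numberOfAvailableDifferentPaths(board, snake, depth):
--     MOD = 1_000_000_007
--
--     def successors(state):
--         hx, hy = state[0][0], state[0][1]
--         body = state[:-1]
--         out = []
--         if hx != 0 and [hx - 1, hy] not in body: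
--             out.append([[hx - 1, hy]] + body)
--         if hx != board[0] - 1 and [hx + 1, hy] not in body:
--             out.append([[hx + 1, hy]] + body)
--         if hy != 0 and [hx, hy - 1] not in body:
--             out.append([[hx, hy - 1]] + body)
--         if hy != board[1] - 1 and [hx, hy + 1] not in body:
--             out.append([[hx, hy + 1]] + body)
--         return out
--
--     def count(state, d):
--         if d <= 0:
--             return 1
--         return sum(count(s, d - 1) for s in successors(state))
--
--     return count(snake, depth) % MOD
-- ===== Notes on version B (the rewrite author's own statement) =====
-- stated objective: alternative
-- what changed: A does a breadth-first expansion that materialises the full list of snake states at every level and returns its length; B replaces the level lists by a direct recursive count over the move tree (an inline successor function plus a depth-indexed recursion returning an integer), carrying no state lists at all.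
import Mathlib
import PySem

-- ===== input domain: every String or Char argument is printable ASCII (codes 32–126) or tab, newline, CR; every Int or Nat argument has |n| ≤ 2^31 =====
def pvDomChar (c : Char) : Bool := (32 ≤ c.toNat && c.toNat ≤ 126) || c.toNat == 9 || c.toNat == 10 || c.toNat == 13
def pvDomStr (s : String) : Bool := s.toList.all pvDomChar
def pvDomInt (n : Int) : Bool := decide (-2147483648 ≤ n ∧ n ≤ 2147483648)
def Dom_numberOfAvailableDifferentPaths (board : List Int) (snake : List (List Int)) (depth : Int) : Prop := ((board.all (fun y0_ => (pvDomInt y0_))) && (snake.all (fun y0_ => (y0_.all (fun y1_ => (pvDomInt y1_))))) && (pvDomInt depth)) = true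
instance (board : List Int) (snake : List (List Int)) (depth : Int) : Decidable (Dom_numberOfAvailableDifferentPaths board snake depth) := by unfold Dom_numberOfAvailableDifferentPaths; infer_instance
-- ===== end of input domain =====

-- B replaces A's breadth-first lists of snake states (whose length is the answer) by a direct
-- recursive count over the move tree, carrying only an integer; objective: alternative (same cost).

-- ===== PORT A =====
-- move(board, snake, action): Option replaces the 'invalid' string (none = invalid).
-- snake[0][0] / snake[0][1] / board[0] / board[1] are total-ized with headD/getD defaults;
-- exact under Pre_ (snake nonempty with a 2-coordinate head, board of length ≥ 2).
-- snake[:-1] and the copy loop 'for i in range(len(snake)-1)' are both List.dropLast.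
def moveA (board : List Int) (snake : List (List Int)) (action : Char) : Option (List (List Int)) :=
  let hx := (snake.headD []).headD 0
  let hy := (snake.headD []).getD 1 0
  if action = 'L' then
    let newHead := [hx - 1, hy]
    if hx = 0 ∨ newHead ∈ snake.dropLast then none
    else some (newHead :: snake.dropLast)
  else if action = 'R' then
    let newHead := [hx + 1, hy]
    if hx = board.headD 0 - 1 ∨ newHead ∈ snake.dropLast then none
    else some (newHead :: snake.dropLast)
  else if action = 'U' then
    let newHead := [hx, hy - 1]
    if hy = 0 ∨ newHead ∈ snake.dropLast then none
    else some (newHead :: snake.dropLast)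
  else -- action == 'D'
    let newHead := [hx, hy + 1]
    if hy = board.getD 1 0 - 1 ∨ newHead ∈ snake.dropLast then none
    else some (newHead :: snake.dropLast)

-- the while loop: one recursive call per iteration; the inner two for-loops collect,
-- in order, every non-invalid movement of every state
def loopA (board : List Int) (states : List (List (List Int))) (fuel : Nat) : List (List (List Int)) :=
  match fuel with
  | 0 => states
  | f + 1 =>
    if states.length = 0 then states
    else loopA board (states.flatMap fun st => ['L', 'R', 'U', 'D'].filterMap (moveA board st)) f

def numberOfAvailableDifferentPaths (board : List Int) (snake : List (List Int)) (depth : Int) : Int :=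
  PySem.Int.mod (Int.ofNat (loopA board [snake] depth.toNat).length) 1000000007

-- ===== PORT B =====
-- successors(state): the four candidate moves checked in-line, in order L,R,U,D
def succB (board : List Int) (state : List (List Int)) : List (List (List Int)) :=
  let hx := (state.headD []).headD 0
  let hy := (state.headD []).getD 1 0
  let body := state.dropLast
  (if hx ≠ 0 ∧ [hx - 1, hy] ∉ body then [[hx - 1, hy] :: body] else []) ++
  (if hx ≠ board.headD 0 - 1 ∧ [hx + 1, hy] ∉ body then [[hx + 1, hy] :: body] else []) ++
  (if hy ≠ 0 ∧ [hx, hy - 1] ∉ body then [[hx, hy - 1] :: body] else []) ++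
  (if hy ≠ board.getD 1 0 - 1 ∧ [hx, hy + 1] ∉ body then [[hx, hy + 1] :: body] else [])

-- count(state, d)
def countB (board : List Int) (state : List (List Int)) (d : Int) : Int :=
  if d ≤ 0 then 1
  else ((succB board state).map (fun s => countB board s (d - 1))).sum
termination_by d.toNat
decreasing_by omega

def numberOfAvailableDifferentPaths_alt (board : List Int) (snake : List (List Int)) (depth : Int) : Int :=
  PySem.Int.mod (countB board snake depth) 1000000007

-- ===== PRECONDITION & SPEC =====
-- Pre_ excludes exactly the inputs where Python A raises an IndexError: as soon as one level is
-- expanded (depth ≥ 1) it reads snake[0][0], snake[0][1], board[0] and board[1].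
def Pre_numberOfAvailableDifferentPaths (board : List Int) (snake : List (List Int)) (depth : Int) : Prop :=
  depth ≤ 0 ∨ (2 ≤ board.length ∧ snake ≠ [] ∧ 2 ≤ (snake.headD []).length)
instance (board : List Int) (snake : List (List Int)) (depth : Int) : Decidable (Pre_numberOfAvailableDifferentPaths board snake depth) := by unfold Pre_numberOfAvailableDifferentPaths; infer_instance

def pvWitness_numberOfAvailableDifferentPaths : List Int × List (List Int) × Int :=
  ([3, 3], [[1, 1], [1, 2]], 2)

def Spec_numberOfAvailableDifferentPaths (board : List Int) (snake : List (List Int)) (depth : Int) (out : Int) : Prop := out = numberOfAvailableDifferentPaths_alt board snake depth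
instance (board : List Int) (snake : List (List Int)) (depth : Int) (out : Int) : Decidable (Spec_numberOfAvailableDifferentPaths board snake depth out) := by unfold Spec_numberOfAvailableDifferentPaths; infer_instance

-- ===== CLAIM (what is proved, stated in full; the proofs are below) =====
def Claim_equal_numberOfAvailableDifferentPaths : Prop := ∀ (board : List Int) (snake : List (List Int)) (depth : Int), Dom_numberOfAvailableDifferentPaths board snake depth → Pre_numberOfAvailableDifferentPaths board snake depth → Spec_numberOfAvailableDifferentPaths board snake depth (numberOfAvailableDifferentPaths board snake depth)

-- ===== LEMMAS AND PROOFS =====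

-- A's four actions filtered through move give exactly B's successor list
theorem toList_ite (c : Prop) [Decidable c] (x : List (List Int)) :
    (if c then none else some x).toList = if ¬ c then [x] else [] := by
  by_cases h : c <;> simp [h]

theorem step_eq (board : List Int) (st : List (List Int)) :
    ['L', 'R', 'U', 'D'].filterMap (moveA board st) = succB board st := by
  have e : ∀ (f : Char → Option (List (List Int))), ['L','R','U','D'].filterMap f
      = (f 'L').toList ++ ((f 'R').toList ++ ((f 'U').toList ++ (f 'D').toList)) := by
    intro f
    cases hL : f 'L' <;> cases hR : f 'R' <;> cases hU : f 'U' <;> cases hD : f 'D' <;>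
      simp [hL, hR, hU, hD]
  have mL : moveA board st 'L' = (if (st.headD []).headD 0 = 0 ∨ [(st.headD []).headD 0 - 1, (st.headD []).getD 1 0] ∈ st.dropLast then none else some ([(st.headD []).headD 0 - 1, (st.headD []).getD 1 0] :: st.dropLast)) := rfl
  have mR : moveA board st 'R' = (if (st.headD []).headD 0 = board.headD 0 - 1 ∨ [(st.headD []).headD 0 + 1, (st.headD []).getD 1 0] ∈ st.dropLast then none else some ([(st.headD []).headD 0 + 1, (st.headD []).getD 1 0] :: st.dropLast)) := rfl
  have mU : moveA board st 'U' = (if (st.headD []).getD 1 0 = 0 ∨ [(st.headD []).headD 0, (st.headD []).getD 1 0 - 1] ∈ st.dropLast then none else some ([(st.headD []).headD 0, (st.headD []).getD 1 0 - 1] :: st.dropLast)) := rfl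
  have mD : moveA board st 'D' = (if (st.headD []).getD 1 0 = board.getD 1 0 - 1 ∨ [(st.headD []).headD 0, (st.headD []).getD 1 0 + 1] ∈ st.dropLast then none else some ([(st.headD []).headD 0, (st.headD []).getD 1 0 + 1] :: st.dropLast)) := rfl
  rw [e (moveA board st), mL, mR, mU, mD, toList_ite, toList_ite, toList_ite, toList_ite]
  simp only [succB, not_or, List.append_assoc]

-- summing a function over a flatMap, level by level
theorem sum_map_flatMap {A B : Type} (f : A → List B) (g : B → Int) :
    ∀ (l : List A), ((l.flatMap f).map g).sum = (l.map (fun x => ((f x).map g).sum)).sum := by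
  intro l
  induction l with
  | nil => simp
  | cons a t ih => simp [ih]

-- the length of A's level after `fuel` expansions is B's count with fuel moves left, summed over the level
theorem len_loop (board : List Int) :
    ∀ (fuel : Nat) (states : List (List (List Int))),
      (((loopA board states fuel).length : Int))
        = (states.map (fun s => countB board s (fuel : Int))).sum := by
  intro fuel
  induction fuel with
  | zero =>
    intro states
    simp [loopA, countB, List.map_const']
  | succ f ih =>
    intro states
    rcases eq_or_ne states [] with rfl | hne
    · simp [loopA]
    · have hlen : states.length ≠ 0 := by simpa using hne
      rw [loopA]
      simp only [hlen, if_false]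
      rw [ih]
      have hc : ∀ s : List (List Int),
          countB board s ((f + 1 : Nat) : Int)
            = ((succB board s).map (fun t => countB board t (f : Int))).sum := by
        intro s
        rw [countB]
        have h1 : ¬ (((f + 1 : Nat) : Int) ≤ 0) := by push_cast; omega
        have h2 : ((f + 1 : Nat) : Int) - 1 = (f : Int) := by push_cast; ring
        simp [h1, h2]
      simp only [step_eq, sum_map_flatMap, hc]

-- ===== VERDICT (by name: the statement is the Claim_ definition above) =====
theorem numberOfAvailableDifferentPaths_spec : Claim_equal_numberOfAvailableDifferentPaths := by
  intro board snake depth _dom _pre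
  unfold Spec_numberOfAvailableDifferentPaths numberOfAvailableDifferentPaths numberOfAvailableDifferentPaths_alt
  congr 1
  rcases le_or_gt depth 0 with h | h
  · have : depth.toNat = 0 := by omega
    rw [this, loopA, countB]
    simp [h]
  · have hd : ((depth.toNat : Nat) : Int) = depth := Int.toNat_of_nonneg (by omega)
    have := len_loop board depth.toNat [snake]
    simp only [List.map_cons, List.map_nil, List.sum_cons, List.sum_nil, add_zero, hd] at this
    exact_mod_cast this
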